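-- pv_equiv track=rewrite | github.com/ml4ai/automates | scripts/remath/batch_tokenize_instructions.py | parse_unicode_string_list
-- ===== SOURCE A (Python) =====
-- def parse_unicode_string_list(ustr):
--     chunks = list()
--     in_str = False
--     str_start = None
--     for i in range(1, len(ustr)):
--         if ustr[i - 1] == 'u' and ustr[i] == '\'' and not in_str:
--             in_str = True
--             str_start = i + 1
--         elif ustr[i - 1] != '\\' and ustr[i] == '\'' and in_str:
--             in_str = False
--             chunks.append(ustr[str_start: i])
--     return chunks
-- ===== SOURCE B (Python) =====
-- def parse_unicode_string_list(ustr):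
--     # find-based scan: jump between openers and unescaped closing quotes
--     res = []
--     i = ustr.find("u'")
--     while i != -1:
--         j = ustr.find("'", i + 2)
--         while j != -1 and ustr[j - 1] == '\\':
--             j = ustr.find("'", j + 1)
--         if j == -1:
--             return res
--         res.append(ustr[i + 2:j])
--         i = ustr.find("u'", j + 1)
--     return res
-- ===== Notes on version B (the rewrite author's own statement) =====
-- stated objective: faster
-- what changed: Replaced the per-character state-machine loop (flag + start index updated at every position) with str.find-based jumps: locate each two-character opener, then the first closing quote not preceded by a backslash, slice the chunk, and resume the search after it.
import Mathlib
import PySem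

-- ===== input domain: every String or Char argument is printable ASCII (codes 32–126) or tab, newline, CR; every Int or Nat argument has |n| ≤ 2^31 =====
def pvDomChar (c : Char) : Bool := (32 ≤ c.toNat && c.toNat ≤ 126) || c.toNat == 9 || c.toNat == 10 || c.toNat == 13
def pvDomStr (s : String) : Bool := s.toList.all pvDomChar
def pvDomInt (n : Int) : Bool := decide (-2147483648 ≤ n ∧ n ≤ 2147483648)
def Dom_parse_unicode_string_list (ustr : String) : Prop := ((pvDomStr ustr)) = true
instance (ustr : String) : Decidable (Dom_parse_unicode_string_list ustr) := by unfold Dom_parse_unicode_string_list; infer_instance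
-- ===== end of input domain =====

-- ===== PORT A =====
-- B replaces A's per-character state-machine loop with find()-based jumps between
-- the two-character opener and the next unescaped closing quote (objective: faster, constant-factor).
def parse_unicode_string_list (ustr : String) : List String :=
  ((PySem.List.pyRange 1 (PySem.Str.len ustr) 1).foldl
    (fun (st : List String × Bool × Option Int) (i : Int) =>
      let (chunks, in_str, str_start) := st
      if PySem.Str.pyGet? ustr (i - 1) == some 'u' && PySem.Str.pyGet? ustr i == some '\'' && !in_str then
        (chunks, true, some (i + 1))
      else if !(PySem.Str.pyGet? ustr (i - 1) == some '\\') && PySem.Str.pyGet? ustr i == some '\'' && in_str then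
        (chunks ++ [PySem.Str.slice ustr str_start (some i)], false, str_start)
      else
        st)
    ([], false, none)).1

-- ===== PORT B =====
-- B jumps with find() between openers and closers instead of scanning every character.
def pvBClose (ustr : String) (fuel : Nat) (j : Int) : Int :=
  match fuel with
  | 0 => j
  | f + 1 =>
    if j != -1 && (PySem.Str.pyGet? ustr (j - 1) == some '\\') then
      pvBClose ustr f (PySem.Str.findFrom ustr "'" (j + 1))
    else j

def pvBMain (ustr : String) (fuel : Nat) (i : Int) (res : List String) : List String :=
  match fuel with
  | 0 => res
  | f + 1 =>
    if i == -1 then res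
    else
      let j := pvBClose ustr ((PySem.Str.len ustr).toNat + 1) (PySem.Str.findFrom ustr "'" (i + 2))
      if j == -1 then res
      else pvBMain ustr f (PySem.Str.findFrom ustr "u'" (j + 1))
             (res ++ [PySem.Str.slice ustr (some (i + 2)) (some j)])

def parse_unicode_string_list_alt (ustr : String) : List String :=
  pvBMain ustr ((PySem.Str.len ustr).toNat + 1) (PySem.Str.find ustr "u'") []

-- ===== PRECONDITION & SPEC =====
def Spec_parse_unicode_string_list (ustr : String) (out : List String) : Prop := out = parse_unicode_string_list_alt ustr
instance (ustr : String) (out : List String) : Decidable (Spec_parse_unicode_string_list ustr out) := by unfold Spec_parse_unicode_string_list; infer_instance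

-- ===== CLAIM (what is proved, stated in full; the proofs are below) =====
def Claim_equal_parse_unicode_string_list : Prop := ∀ (ustr : String), Dom_parse_unicode_string_list ustr → Spec_parse_unicode_string_list ustr (parse_unicode_string_list ustr)

-- ===== LEMMAS AND PROOFS =====

lemma prefix_drop_one (cs : List Char) (q : Nat) (c : Char) :
    [c] <+: cs.drop q ↔ cs[q]? = some c := by
  rw [show cs[q]? = (cs.drop q)[0]? by simp]
  cases h : cs.drop q with
  | nil => simp
  | cons x t => simp [List.cons_prefix_cons, eq_comm]

lemma prefix_drop_two (cs : List Char) (p : Nat) (c d : Char) :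
    [c, d] <+: cs.drop p ↔ cs[p]? = some c ∧ cs[p+1]? = some d := by
  rw [show cs[p]? = (cs.drop p)[0]? by simp,
      show cs[p+1]? = (cs.drop p)[1]? by simp [List.getElem?_drop]]
  cases h : cs.drop p with
  | nil => simp
  | cons x t =>
    cases t with
    | nil => simp [List.cons_prefix_cons, eq_comm]
    | cons y u => simp [List.cons_prefix_cons, eq_comm, and_comm]
lemma find_cons (c : Char) (t : List Char) (sub : List Char) :
    PySem.Chars.find (c :: t) sub =
      if sub <+: (c :: t) then 0
      else if PySem.Chars.find t sub = -1 then -1 else PySem.Chars.find t sub + 1 := by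
  split
  · next h =>
    have hnn : 0 ≤ PySem.Chars.find (c :: t) sub :=
      (PySem.Chars.find_nonneg_iff _ _).mpr h.isInfix
    obtain ⟨h1, h2⟩ := PySem.Chars.find_spec hnn
    have : (PySem.Chars.find (c :: t) sub).toNat = 0 := by
      by_contra hne
      exact h2 0 (by omega) (by simpa using h)
    omega
  · next h =>
    split
    · next ht =>
      rw [PySem.Chars.find_eq_neg_one_iff] at ht ⊢
      intro hinf
      obtain ⟨j, hj⟩ := (PySem.Chars.exists_prefix_drop_iff_isIn sub (c :: t)).mpr
        ((PySem.Chars.isIn_iff_infix _ _).mpr hinf)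
      cases j with
      | zero => exact h (by simpa using hj)
      | succ j' =>
        exact ht ((PySem.Chars.exists_prefix_drop_iff_isIn sub t).mp ⟨j', by simpa using hj⟩ |>
          (PySem.Chars.isIn_iff_infix _ _).mp)
    · next ht =>
      have hmn : 0 ≤ PySem.Chars.find t sub := by
        have := PySem.Chars.neg_one_le_find t sub
        omega
      obtain ⟨hm1, hm2⟩ := PySem.Chars.find_spec hmn
      set m := (PySem.Chars.find t sub).toNat with hm
      -- occurrence at m+1 in c :: t
      have hocc : sub <+: (c :: t).drop (m + 1) := by simpa using hm1
      have hnn : 0 ≤ PySem.Chars.find (c :: t) sub := by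
        rw [PySem.Chars.find_nonneg_iff]
        exact hocc.isInfix.trans (List.drop_suffix (m+1) (c :: t)).isInfix
      obtain ⟨h1, h2⟩ := PySem.Chars.find_spec hnn
      generalize hV : (PySem.Chars.find (c :: t) sub).toNat = v at h1 h2
      have hvm : v = m + 1 := by
        rcases Nat.lt_trichotomy v (m + 1) with hlt | heq | hgt
        · rcases Nat.eq_zero_or_pos v with h0 | hpos
          · rw [h0] at h1; exact absurd (by simpa using h1) h
          · obtain ⟨w, rfl⟩ : ∃ w, v = w + 1 := ⟨v - 1, by omega⟩
            exact absurd (by simpa using h1) (hm2 w (by omega))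
        · exact heq
        · exact absurd hocc (h2 (m+1) hgt)
      omega

lemma findFrom_step (cs sub : List Char) (k : Nat) (hk : k < cs.length) :
    PySem.Chars.findFrom cs sub (k : Int) =
      if sub <+: cs.drop k then (k : Int) else PySem.Chars.findFrom cs sub ((k : Nat) + 1 : Nat) := by
  rw [PySem.Chars.findFrom_natCast cs sub k (le_of_lt hk),
      PySem.Chars.findFrom_natCast cs sub (k+1) (by omega),
      List.drop_eq_getElem_cons hk, find_cons]
  by_cases hp : sub <+: cs.drop k
  · simp [hp, ← List.drop_eq_getElem_cons hk]
  · simp only [← List.drop_eq_getElem_cons hk, hp, if_false]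
    rcases eq_or_ne (PySem.Chars.find (cs.drop (k+1)) sub) (-1) with he | he
    · simp [he]
    · have : ¬ (PySem.Chars.find (cs.drop (k+1)) sub + 1 = -1) := by
        have := PySem.Chars.neg_one_le_find (cs.drop (k+1)) sub
        omega
      simp only [he, if_false, this, if_false]
      push_cast
      ring

lemma findFrom_end (cs sub : List Char) (k : Nat) (hk : k ≤ cs.length)
    (hlen : cs.length < k + sub.length) :
    PySem.Chars.findFrom cs sub (k : Int) = -1 := by
  rw [PySem.Chars.findFrom_natCast cs sub k hk]
  have : PySem.Chars.find (cs.drop k) sub = -1 := by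
    rw [PySem.Chars.find_eq_neg_one_iff]
    intro hinf
    have := hinf.length_le
    simp [List.length_drop] at this
    omega
  simp [this]

def specQ (ustr : String) (q : Nat) : Option Nat :=
  if h : q < ustr.toList.length then
    if ustr.toList[q]? = some '\'' ∧ ustr.toList[q-1]? ≠ some '\\' then some q
    else specQ ustr (q + 1)
  else none
termination_by ustr.toList.length - q
decreasing_by all_goals (simp only [String.length_toList] at *; omega)

lemma specQ_bounds (ustr : String) (q q' : Nat) (h : specQ ustr q = some q') :
    q ≤ q' ∧ q' < ustr.toList.length := by
  fun_induction specQ ustr q with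
  | case1 q hq hcond => simp at h; omega
  | case2 q hq hcond ih => have := ih h; omega
  | case3 q hq => simp at h

lemma bclose_eq_specQ (ustr : String) : ∀ d q, ustr.toList.length - q = d → 1 ≤ q →
    q ≤ ustr.toList.length → ∀ fuel, ustr.toList.length - q < fuel →
      pvBClose ustr fuel (PySem.Str.findFrom ustr "'" (q : Int)) =
        (match specQ ustr q with | some q' => (q' : Int) | none => -1) := by
  intro d
  induction d using Nat.strong_induction_on with
  | _ d ih =>
    intro q hd hq1 hqn fuel hfuel
    obtain ⟨f, rfl⟩ : ∃ f, fuel = f + 1 := ⟨fuel - 1, by omega⟩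
    rcases eq_or_lt_of_le hqn with heq | hlt
    · -- q = length : no quote found
      rw [PySem.Str.findFrom_eq, show ("'" : String).toList = ['\''] from rfl,
          findFrom_end ustr.toList ['\''] q hqn (by simp only [List.length_singleton]; omega)]
      rw [specQ]
      simp [pvBClose, heq]
    · rw [PySem.Str.findFrom_eq, show ("'" : String).toList = ['\''] from rfl,
          findFrom_step ustr.toList ['\''] q hlt]
      simp only [prefix_drop_one]
      rw [← show ("'" : String).toList = ['\''] from rfl, ← PySem.Str.findFrom_eq]
      by_cases hquote : ustr.toList[q]? = some '\''
      · rw [if_pos hquote]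
        have hqne : ¬ ((q : Int) = -1) := by omega
        have hprev : PySem.Str.pyGet? ustr ((q : Int) - 1) = ustr.toList[q-1]? := by
          rw [show ((q : Int) - 1) = ((q - 1 : Nat) : Int) by omega, PySem.Str.pyGet?_natCast]
        rw [pvBClose.eq_def]
        simp only [hprev]
        by_cases hbs : ustr.toList[q-1]? = some '\\'
        · -- escaped: B searches on from q+1, specQ steps to q+1
          rw [hbs, if_pos (by simp [hqne])]
          rw [show ((q : Int) + 1) = ((q + 1 : Nat) : Int) by push_cast; ring]
          rw [ih (ustr.toList.length - (q+1)) (by omega) (q+1) rfl (by omega) (by omega) f (by omega)]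
          conv_rhs => rw [specQ]
          rw [dif_pos hlt, if_neg (fun hc => hc.2 hbs)]
        · -- unescaped: B stops at q, specQ returns q
          rw [if_neg (by simp [hbs])]
          conv_rhs => rw [specQ]
          rw [dif_pos hlt, if_pos ⟨hquote, hbs⟩]
      · rw [if_neg hquote]
        rw [ih (ustr.toList.length - (q+1)) (by omega) (q+1) rfl (by omega) (by omega) (f+1) (by omega)]
        conv_rhs => rw [specQ]
        rw [dif_pos hlt, if_neg (fun hc => hquote hc.1)]

mutual
def specOut (ustr : String) (p : Nat) : List String :=
  if h : p + 1 < ustr.toList.length then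
    if ustr.toList[p]? = some 'u' ∧ ustr.toList[p+1]? = some '\'' then
      specIn ustr (p + 2) (p + 2)
    else specOut ustr (p + 1)
  else []
  termination_by ustr.toList.length - p
  decreasing_by all_goals (simp only [String.length_toList] at *; omega)
def specIn (ustr : String) (q start : Nat) : List String :=
  if h : q < ustr.toList.length then
    if ustr.toList[q]? = some '\'' ∧ ustr.toList[q-1]? ≠ some '\\' then
      PySem.Str.slice ustr (some (start : Int)) (some (q : Int)) :: specOut ustr (q + 1)
    else specIn ustr (q + 1) start
  else []
  termination_by ustr.toList.length - q
  decreasing_by all_goals (simp only [String.length_toList] at *; omega)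
end

lemma specIn_eq_specQ (ustr : String) : ∀ d q start, ustr.toList.length - q = d →
    specIn ustr q start =
      (match specQ ustr q with
       | some q' => PySem.Str.slice ustr (some (start : Int)) (some (q' : Int)) :: specOut ustr (q' + 1)
       | none => []) := by
  intro d
  induction d using Nat.strong_induction_on with
  | _ d ih =>
    intro q start hd
    rw [specIn, specQ]
    by_cases hlt : q < ustr.toList.length
    · rw [dif_pos hlt, dif_pos hlt]
      by_cases hc : ustr.toList[q]? = some '\'' ∧ ustr.toList[q-1]? ≠ some '\\'
      · rw [if_pos hc, if_pos hc]
      · rw [if_neg hc, if_neg hc, ih (ustr.toList.length - (q+1)) (by omega) (q+1) start rfl]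
    · rw [dif_neg hlt, dif_neg hlt]

lemma bmain_eq_specOut (ustr : String) : ∀ d m, ustr.toList.length - m = d →
    m ≤ ustr.toList.length → ∀ fuel, ustr.toList.length - m < fuel → ∀ acc,
      pvBMain ustr fuel (PySem.Str.findFrom ustr "u'" (m : Int)) acc = acc ++ specOut ustr m := by
  intro d
  induction d using Nat.strong_induction_on with
  | _ d ih =>
    intro m hd hm fuel hfuel acc
    obtain ⟨f, rfl⟩ : ∃ f, fuel = f + 1 := ⟨fuel - 1, by omega⟩
    by_cases hend : m + 1 < ustr.toList.length
    · rw [PySem.Str.findFrom_eq, show ("u'" : String).toList = ['u', '\''] from rfl,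
          findFrom_step ustr.toList ['u', '\''] m (by omega)]
      simp only [prefix_drop_two]
      rw [← show ("u'" : String).toList = ['u', '\''] from rfl, ← PySem.Str.findFrom_eq]
      by_cases hpair : ustr.toList[m]? = some 'u' ∧ ustr.toList[m+1]? = some '\''
      · rw [if_pos hpair, pvBMain.eq_def]
        simp only [show (((m : Int)) == -1) = false by simp, Bool.false_eq_true,
          if_false, PySem.Str.len_eq, Int.toNat_natCast]
        rw [show ((m : Int) + 2) = ((m + 2 : Nat) : Int) by push_cast; ring]
        rw [bclose_eq_specQ ustr (ustr.toList.length - (m+2)) (m+2) rfl (by omega) (by omega)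
            (ustr.toList.length + 1) (by omega)]
        rw [specOut, dif_pos hend, if_pos hpair,
            specIn_eq_specQ ustr (ustr.toList.length - (m+2)) (m+2) (m+2) rfl]
        cases hQ : specQ ustr (m+2) with
        | none => simp
        | some q' =>
          obtain ⟨hq'1, hq'2⟩ := specQ_bounds ustr (m+2) q' hQ
          simp only [show (((q' : Int)) == -1) = false by simp, Bool.false_eq_true, if_false]
          rw [show ((q' : Int) + 1) = ((q' + 1 : Nat) : Int) by push_cast; ring]
          rw [ih (ustr.toList.length - (q'+1)) (by omega) (q'+1) rfl (by omega) f (by omega)]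
          simp
      · rw [if_neg hpair]
        rw [ih (ustr.toList.length - (m+1)) (by omega) (m+1) rfl (by omega) (f+1) (by omega)]
        conv_rhs => rw [specOut]
        rw [dif_pos hend, if_neg hpair]
    · rw [PySem.Str.findFrom_eq, show ("u'" : String).toList = ['u', '\''] from rfl,
          findFrom_end ustr.toList ['u', '\''] m hm (by simp only [List.length_cons]; omega)]
      rw [pvBMain.eq_def]
      rw [specOut, dif_neg hend]
      simp

lemma arun_eq_spec (ustr : String) : ∀ d k, ustr.toList.length - k = d → 1 ≤ k →
    (∀ acc ss, ((PySem.List.pyRange (k : Int) (PySem.Str.len ustr) 1).foldl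
      (fun (st : List String × Bool × Option Int) (i : Int) =>
        if PySem.Str.pyGet? ustr (i - 1) == some 'u' && PySem.Str.pyGet? ustr i == some '\'' && !st.2.1 then
          (st.1, true, some (i + 1))
        else if !(PySem.Str.pyGet? ustr (i - 1) == some '\\') && PySem.Str.pyGet? ustr i == some '\'' && st.2.1 then
          (st.1 ++ [PySem.Str.slice ustr st.2.2 (some i)], false, st.2.2)
        else st)
      (acc, false, ss)).1 = acc ++ specOut ustr (k - 1)) ∧
    (∀ acc (start : Nat), ((PySem.List.pyRange (k : Int) (PySem.Str.len ustr) 1).foldl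
      (fun (st : List String × Bool × Option Int) (i : Int) =>
        if PySem.Str.pyGet? ustr (i - 1) == some 'u' && PySem.Str.pyGet? ustr i == some '\'' && !st.2.1 then
          (st.1, true, some (i + 1))
        else if !(PySem.Str.pyGet? ustr (i - 1) == some '\\') && PySem.Str.pyGet? ustr i == some '\'' && st.2.1 then
          (st.1 ++ [PySem.Str.slice ustr st.2.2 (some i)], false, st.2.2)
        else st)
      (acc, true, some (start : Int))).1 = acc ++ specIn ustr k start) := by
  intro d
  induction d using Nat.strong_induction_on with
  | _ d ih =>
    intro k hd hk1
    rw [PySem.Str.len_eq]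
    by_cases hkn : k < ustr.toList.length
    · have e1 : PySem.Str.pyGet? ustr ((k : Int) - 1) = ustr.toList[k-1]? := by
        rw [show ((k : Int) - 1) = ((k - 1 : Nat) : Int) by omega, PySem.Str.pyGet?_natCast]
      have e2 : PySem.Str.pyGet? ustr (k : Int) = ustr.toList[k]? := PySem.Str.pyGet?_natCast ustr k
      have hcons := PySem.List.pyRange_one_cons (a := (k:Int)) (b := (ustr.toList.length : Int)) (by omega)
      have hcast : ((k : Int) + 1) = ((k + 1 : Nat) : Int) := by push_cast; ring
      constructor
      · intro acc ss
        rw [hcons, List.foldl_cons]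
        simp only [e1, e2]
        rw [hcast, ← PySem.Str.len_eq ustr]
        by_cases hpair : ustr.toList[k-1]? = some 'u' ∧ ustr.toList[k]? = some '\''
        · have c1 : (ustr.toList[k-1]? == some 'u' && ustr.toList[k]? == some '\'' && !false) = true := by
            simp [hpair.1, hpair.2]
          rw [if_pos c1]
          rw [(ih (ustr.toList.length - (k+1)) (by omega) (k+1) rfl (by omega)).2 acc (k+1)]
          conv_rhs => rw [specOut]
          rw [dif_pos (by omega : k - 1 + 1 < ustr.toList.length)]
          rw [if_pos (by refine ⟨hpair.1, ?_⟩; rw [show k - 1 + 1 = k by omega]; exact hpair.2)]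
          rw [show k - 1 + 2 = k + 1 by omega]
        · have c1 : (ustr.toList[k-1]? == some 'u' && ustr.toList[k]? == some '\'' && !false) = false := by
            rcases not_and_or.mp hpair with h | h <;> simp [h]
          rw [if_neg (by rw [c1]; exact Bool.false_ne_true)]
          have c2 : (!(ustr.toList[k-1]? == some '\\') && ustr.toList[k]? == some '\'' && false) = false := by
            simp
          rw [if_neg (by rw [c2]; exact Bool.false_ne_true)]
          rw [(ih (ustr.toList.length - (k+1)) (by omega) (k+1) rfl (by omega)).1 acc ss]
          conv_rhs => rw [specOut]
          rw [dif_pos (by omega : k - 1 + 1 < ustr.toList.length)]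
          rw [if_neg (by rw [show k - 1 + 1 = k by omega]; exact hpair)]
          rw [show k - 1 + 1 = k + 1 - 1 by omega]
      · intro acc start
        rw [hcons, List.foldl_cons]
        simp only [e1, e2]
        rw [hcast, ← PySem.Str.len_eq ustr]
        have c1 : (ustr.toList[k-1]? == some 'u' && ustr.toList[k]? == some '\'' && !true) = false := by
          simp
        rw [if_neg (by rw [c1]; exact Bool.false_ne_true)]
        by_cases hclose : ustr.toList[k]? = some '\'' ∧ ustr.toList[k-1]? ≠ some '\\'
        · have c2 : (!(ustr.toList[k-1]? == some '\\') && ustr.toList[k]? == some '\'' && true) = true := by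
            simp [hclose.1, hclose.2]
          rw [if_pos c2]
          rw [(ih (ustr.toList.length - (k+1)) (by omega) (k+1) rfl (by omega)).1
              (acc ++ [PySem.Str.slice ustr (some (start : Int)) (some (k : Int))]) (some (start : Int))]
          conv_rhs => rw [specIn]
          rw [dif_pos hkn, if_pos hclose]
          rw [show k + 1 - 1 = k by omega]
          have hstep : specOut ustr k = specOut ustr (k + 1) := by
            rw [specOut]
            by_cases hg : k + 1 < ustr.toList.length
            · rw [dif_pos hg, if_neg (fun hc => by rw [hclose.1] at hc; exact absurd hc.1 (by decide))]
            · rw [dif_neg hg]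
              conv_rhs => rw [specOut]
              rw [dif_neg (by omega : ¬ (k + 1 + 1 < ustr.toList.length))]
          rw [hstep, List.append_assoc]
          rfl
        · have c2 : (!(ustr.toList[k-1]? == some '\\') && ustr.toList[k]? == some '\'' && true) = false := by
            rcases not_and_or.mp hclose with h | h
            · simp [h]
            · simp only [not_not] at h; simp [h]
          rw [if_neg (by rw [c2]; exact Bool.false_ne_true)]
          rw [(ih (ustr.toList.length - (k+1)) (by omega) (k+1) rfl (by omega)).2 acc start]
          conv_rhs => rw [specIn]
          rw [dif_pos hkn, if_neg hclose]
    · have hnil := PySem.List.pyRange_one_eq_nil (a := (k:Int)) (b := (ustr.toList.length : Int)) (by omega)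
      rw [hnil]
      constructor
      · intro acc ss
        simp only [List.foldl_nil]
        rw [specOut, dif_neg (by omega : ¬ (k - 1 + 1 < ustr.toList.length))]
        simp
      · intro acc start
        simp only [List.foldl_nil]
        rw [specIn, dif_neg hkn]
        simp

-- ===== VERDICT (by name: the statement is the Claim_ definition above) =====
theorem parse_unicode_string_list_spec : Claim_equal_parse_unicode_string_list := by
  intro ustr _
  unfold Spec_parse_unicode_string_list parse_unicode_string_list parse_unicode_string_list_alt
  have hA := (arun_eq_spec ustr (ustr.toList.length - 1) 1 rfl le_rfl).1 [] none
  have hB := bmain_eq_specOut ustr ustr.toList.length 0 rfl (Nat.zero_le _)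
      (ustr.toList.length + 1) (by omega) []
  rw [show ((1 : Nat) : Int) = (1 : Int) by norm_num] at hA
  rw [show PySem.Str.findFrom ustr "u'" ((0 : Nat) : Int) = PySem.Str.find ustr "u'" by
      rw [PySem.Str.findFrom_eq, show ((0:Nat):Int) = 0 by norm_num, PySem.Chars.findFrom_zero,
          ← PySem.Str.find_eq]] at hB
  rw [show (PySem.Str.len ustr).toNat = ustr.toList.length by simp [PySem.Str.len_eq]]
  rw [hB]
  simpa using hA
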